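-- pv_equiv track=rewrite | github.com/mihaelacr/ProjectEuler | Problem33.py | cancel_digits
-- ===== SOURCE A (Python) =====
-- def cancel_digits(numerator, denominator):
--     """
--     Cancel out the common digits in numerator and denominator,
--     except for the trivial case of cancelling zeros.
--
--     Assuming at most two digit numbers, so there
--     is a unique cancelling.
--     """
--     numer_digits = list(str(numerator))
--     denom_digits = list(str(denominator))
--
--     # Treat as an array of strings and iterate
--     # through pairs of digits, cancelling inplace
--     # by replacing the digits with the empty string
--     for i in range(len(numer_digits)):
--         for j in range(len(denom_digits)):
--             if numer_digits[i] == denom_digits[j]: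
--                 if numer_digits[i] == "0":
--                     # Ignore trivial cases
--                     continue
--                 numer_digits[i] = ""
--                 denom_digits[j] = ""
--
--     # Rebuild the number into an integer, using 0
--     # as a sentinel if a number got completely
--     # cancelled
--     numer_int = int("0" + "".join(numer_digits))
--     denom_int = int("0" + "".join(denom_digits))
--
--     return numer_int, denom_int
-- ===== SOURCE B (Python) =====
-- def cancel_digits(numerator, denominator):
--     """Cancel common non-zero digits via one counting pass per operand (no nested scans)."""
--     num_str = str(numerator)
--     den_str = str(denominator)
--
--     avail = {}
--     for c in den_str:
--         avail[c] = avail.get(c, 0) + 1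
--
--     cancelled = {}
--     num_keep = []
--     for c in num_str:
--         if c != "0" and avail.get(c, 0) > 0:
--             avail[c] -= 1
--             cancelled[c] = cancelled.get(c, 0) + 1
--         else:
--             num_keep.append(c)
--
--     den_keep = []
--     for c in den_str:
--         if cancelled.get(c, 0) > 0:
--             cancelled[c] -= 1
--         else:
--             den_keep.append(c)
--
--     return int("0" + "".join(num_keep)), int("0" + "".join(den_keep))
-- ===== Notes on version B (the rewrite author's own statement) =====
-- stated objective: alternative
-- what changed: Replaces A's nested index loops that blank matched digit slots in place with a counting dict of the denominator's characters, one pass over the numerator decrementing availability while recording cancellations, and one pass over the denominator dropping the first cancelled occurrences.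
import Mathlib
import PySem

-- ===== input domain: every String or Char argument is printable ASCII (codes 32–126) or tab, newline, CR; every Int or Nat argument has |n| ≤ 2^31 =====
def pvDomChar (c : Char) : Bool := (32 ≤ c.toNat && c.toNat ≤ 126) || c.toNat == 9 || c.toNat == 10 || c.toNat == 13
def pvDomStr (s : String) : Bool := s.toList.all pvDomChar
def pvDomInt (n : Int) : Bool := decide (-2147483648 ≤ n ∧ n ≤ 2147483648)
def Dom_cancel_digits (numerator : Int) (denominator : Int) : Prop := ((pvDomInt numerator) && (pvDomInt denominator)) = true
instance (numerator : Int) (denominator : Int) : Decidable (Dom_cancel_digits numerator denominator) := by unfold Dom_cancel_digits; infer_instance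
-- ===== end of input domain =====

-- B replaces A's nested in-place digit blanking with counting dicts and two linear passes (alternative structure, same values).

-- ===== PORT A =====
-- inner loop 'for j in range(len(denom_digits))' for a fixed outer position whose current value is c
-- (Python strings modelled as List Char; the list elements are one-char strings or "" after blanking)
def aInner : List Char → List (List Char) → List Char × List (List Char)
  | c, [] => (c, [])
  | c, d :: rest =>
    if c = d then
      if c = ['0'] then
        -- "Ignore trivial cases": continue
        let r := aInner c rest
        (r.1, d :: r.2)
      else
        -- numer_digits[i] = "" ; denom_digits[j] = ""
        let r := aInner [] rest
        (r.1, [] :: r.2)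
    else
      let r := aInner c rest
      (r.1, d :: r.2)

-- outer loop 'for i in range(len(numer_digits))'
def aOuter : List (List Char) → List (List Char) → List (List Char) × List (List Char)
  | [], dd => ([], dd)
  | n :: rest, dd =>
    let p := aInner n dd
    let q := aOuter rest p.2
    (p.1 :: q.1, q.2)

def cancel_digits (numerator : Int) (denominator : Int) : Int × Int :=
  let nd := (PySem.Int.toChars numerator).map (fun c => [c])
  let dd := (PySem.Int.toChars denominator).map (fun c => [c])
  let r := aOuter nd dd
  -- int("0" + "".join(...)); Pre_ excludes the mixed-sign inputs where Python's int() raises (getD 0 is unreachable there)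
  ((PySem.Int.ofChars? ('0' :: r.1.flatten)).getD 0,
   (PySem.Int.ofChars? ('0' :: r.2.flatten)).getD 0)

-- ===== PORT B =====
-- first pass over the numerator: state (avail, cancelled), emits num_keep
def bPass1 : List Char → PySem.Dict Char Int → PySem.Dict Char Int → PySem.Dict Char Int × PySem.Dict Char Int × List Char
  | [], avail, cancelled => (avail, cancelled, [])
  | c :: rest, avail, cancelled =>
    if c ≠ '0' ∧ avail.getD c 0 > 0 then
      bPass1 rest (avail.insert c (avail.getD c 0 - 1)) (cancelled.insert c (cancelled.getD c 0 + 1))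
    else
      let r := bPass1 rest avail cancelled
      (r.1, r.2.1, c :: r.2.2)

-- second pass over the denominator: drop the first cancelled occurrences
def bPass2 : List Char → PySem.Dict Char Int → List Char
  | [], _ => []
  | c :: rest, cancelled =>
    if cancelled.getD c 0 > 0 then bPass2 rest (cancelled.insert c (cancelled.getD c 0 - 1))
    else c :: bPass2 rest cancelled

def cancel_digits_alt (numerator : Int) (denominator : Int) : Int × Int :=
  let ns := PySem.Int.toChars numerator
  let ds := PySem.Int.toChars denominator
  let avail := ds.foldl (fun d c => d.insert c (d.getD c 0 + 1)) PySem.Dict.empty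
  let r := bPass1 ns avail PySem.Dict.empty
  ((PySem.Int.ofChars? ('0' :: r.2.2)).getD 0,
   (PySem.Int.ofChars? ('0' :: bPass2 ds r.2.1)).getD 0)

-- ===== PRECONDITION & SPEC =====
-- Pre_ excludes exactly the mixed-sign inputs, on which Python's int("0" + ...) raises ValueError
-- (a leftover '-' sits inside the rebuilt string); on every other input A returns normally.
def Pre_cancel_digits (numerator : Int) (denominator : Int) : Prop :=
  (0 ≤ numerator ∧ 0 ≤ denominator) ∨ (numerator < 0 ∧ denominator < 0)
instance (numerator : Int) (denominator : Int) : Decidable (Pre_cancel_digits numerator denominator) := by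
  unfold Pre_cancel_digits; infer_instance

def pvWitness_cancel_digits : Int × Int := (49, 98)

def Spec_cancel_digits (numerator : Int) (denominator : Int) (out : Int × Int) : Prop := out = cancel_digits_alt numerator denominator
instance (numerator : Int) (denominator : Int) (out : Int × Int) : Decidable (Spec_cancel_digits numerator denominator out) := by unfold Spec_cancel_digits; infer_instance

-- ===== CLAIM (what is proved, stated in full; the proofs are below) =====
def Claim_equal_cancel_digits : Prop := ∀ (numerator : Int) (denominator : Int), Dom_cancel_digits numerator denominator → Pre_cancel_digits numerator denominator → Spec_cancel_digits numerator denominator (cancel_digits numerator denominator)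

-- ===== LEMMAS AND PROOFS =====

-- proof-side model of A's denominator state: the original chars with, per char, its first m[c] occurrences blanked
def markM : List Char → PySem.Dict Char Int → List (List Char)
  | [], _ => []
  | c :: rest, m =>
    if m.getD c 0 > 0 then [] :: markM rest (m.insert c (m.getD c 0 - 1))
    else [c] :: markM rest m

def blankFirst (c : List Char) : List (List Char) → List (List Char)
  | [] => []
  | d :: r => if d = c then [] :: r else d :: blankFirst c r

theorem markM_congr (ds : List Char) (m₁ m₂ : PySem.Dict Char Int)
    (h : ∀ ch, m₁.getD ch 0 = m₂.getD ch 0) : markM ds m₁ = markM ds m₂ := by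
  induction ds generalizing m₁ m₂ with
  | nil => rfl
  | cons c rest ih =>
    simp only [markM, h c]
    split_ifs with hv
    · refine congrArg _ (ih _ _ ?_)
      intro ch
      simp [PySem.Dict.getD_insert, h ch]
    · exact congrArg _ (ih _ _ h)

theorem flatten_markM (ds : List Char) (m : PySem.Dict Char Int) :
    (markM ds m).flatten = bPass2 ds m := by
  induction ds generalizing m with
  | nil => rfl
  | cons c rest ih =>
    simp only [markM, bPass2]
    split_ifs with hv <;> simp [ih]

theorem aInner_nil (dd : List (List Char)) : aInner [] dd = ([], dd) := by
  induction dd with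
  | nil => rfl
  | cons d rest ih =>
    by_cases hd : ([] : List Char) = d
    · simp [aInner, ← hd, ih]
    · simp [aInner, hd, ih]

theorem aInner_zero (dd : List (List Char)) : aInner ['0'] dd = (['0'], dd) := by
  induction dd with
  | nil => rfl
  | cons d rest ih =>
    by_cases hd : (['0'] : List Char) = d
    · simp [aInner, ← hd, ih]
    · simp [aInner, hd, ih]

theorem aInner_not_mem (c : List Char) (dd : List (List Char)) (h : c ∉ dd) :
    aInner c dd = (c, dd) := by
  induction dd with
  | nil => rfl
  | cons d rest ih =>
    have hd : c ≠ d := fun he => h (he ▸ List.mem_cons_self)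
    have : c ∉ rest := fun hm => h (List.mem_cons_of_mem _ hm)
    simp [aInner, hd, ih this]

theorem aInner_mem (c : List Char) (dd : List (List Char)) (h0 : c ≠ ['0']) (h : c ∈ dd) :
    aInner c dd = ([], blankFirst c dd) := by
  induction dd with
  | nil => cases h
  | cons d rest ih =>
    by_cases hd : c = d
    · subst hd
      simp [aInner, h0, aInner_nil, blankFirst]
    · have : c ∈ rest := by
        rcases List.mem_cons.mp h with h' | h'
        · exact absurd h' hd
        · exact h'
      have hdc : d ≠ c := fun he => hd he.symm
      simp [aInner, hd, blankFirst, hdc, ih this]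

theorem count_blankFirst (c : List Char) (dd : List (List Char)) (h : c ∈ dd)
    (e : List Char) (he : e ≠ []) :
    (blankFirst c dd).count e = dd.count e - (if e = c then 1 else 0) := by
  induction dd with
  | nil => cases h
  | cons d rest ih =>
    by_cases hd : d = c
    · subst hd
      have h1 : blankFirst d (d :: rest) = [] :: rest := by simp [blankFirst]
      have h2 : ([] :: rest).count e = rest.count e := by simp [he]
      have h3 : (d :: rest).count e = rest.count e + (if e = d then 1 else 0) := by
        rw [List.count_cons]; simp only [beq_iff_eq]; congr 1
        exact if_congr eq_comm rfl rfl
      rw [h1, h2, h3]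
      by_cases hed : e = d <;> simp [hed]
    · have hmem : c ∈ rest := by
        rcases List.mem_cons.mp h with h' | h'
        · exact absurd h'.symm hd
        · exact h'
      have hcount : (if e = c then 1 else 0) ≤ rest.count e := by
        by_cases hec : e = c
        · simpa [hec] using List.count_pos_iff.mpr hmem
        · simp [hec]
      have h1 : blankFirst c (d :: rest) = d :: blankFirst c rest := by simp [blankFirst, hd]
      have h2 : (d :: blankFirst c rest).count e = (blankFirst c rest).count e + (if e = d then 1 else 0) := by
        rw [List.count_cons]; simp only [beq_iff_eq]; congr 1
        exact if_congr eq_comm rfl rfl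
      have h3 : (d :: rest).count e = rest.count e + (if e = d then 1 else 0) := by
        rw [List.count_cons]; simp only [beq_iff_eq]; congr 1
        exact if_congr eq_comm rfl rfl
      rw [h1, h2, h3, ih hmem]
      by_cases hec : e = c
      · have hne : e ≠ d := fun hh => hd (hh.symm.trans hec)
        simp only [if_pos hec, if_neg hne]
        have h4 : 1 ≤ rest.count e := by rw [hec]; exact List.count_pos_iff.mpr hmem
        omega
      · simp only [if_neg hec]
        by_cases hed : e = d
        · simp only [if_pos hed]; omega
        · simp only [if_neg hed]; omega

theorem markM_step (ds : List Char) (m : PySem.Dict Char Int) (c : Char)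
    (hm : ∀ ch, 0 ≤ m.getD ch 0) (hmem : [c] ∈ markM ds m) :
    blankFirst [c] (markM ds m) = markM ds (m.insert c (m.getD c 0 + 1)) := by
  induction ds generalizing m with
  | nil => cases hmem
  | cons d rest ih =>
    by_cases hdc : d = c
    · subst hdc
      by_cases hv : m.getD d 0 > 0
      · -- slot already blanked: head is [], blank the first [d] in the tail
        have hmem' : [d] ∈ markM rest (m.insert d (m.getD d 0 - 1)) := by
          simpa [markM, hv] using hmem
        have hm' : ∀ ch, 0 ≤ (m.insert d (m.getD d 0 - 1)).getD ch 0 := by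
          intro ch
          simp only [PySem.Dict.getD_insert]
          split_ifs with hch
          · omega
          · exact hm ch
        have := ih (m.insert d (m.getD d 0 - 1)) hm' hmem'
        have hpos : (m.insert d (m.getD d 0 + 1)).getD d 0 > 0 := by
          have := hm d; simp; omega
        simp only [markM, if_pos hv, if_pos hpos, blankFirst]
        rw [if_neg (by simp)]
        refine congrArg _ (this.trans (markM_congr _ _ _ ?_))
        intro ch
        simp only [PySem.Dict.getD_insert]
        split_ifs <;> simp
      · -- head slot holds [d]: it is the first occurrence, gets blanked
        have hpos : (m.insert d (m.getD d 0 + 1)).getD d 0 > 0 := by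
          have := hm d; simp; omega
        simp only [markM, if_neg hv, if_pos hpos, blankFirst]
        refine congrArg _ (markM_congr _ _ _ ?_)
        intro ch
        simp only [PySem.Dict.getD_insert]
        split_ifs with h1
        · simp [h1]
        · simp
    · -- d ≠ c: head untouched either way
      by_cases hv : m.getD d 0 > 0
      · have hv' : (m.insert c (m.getD c 0 + 1)).getD d 0 > 0 := by
          simpa [PySem.Dict.getD_insert, hdc] using hv
        have hmem' : [c] ∈ markM rest (m.insert d (m.getD d 0 - 1)) := by
          simpa [markM, hv] using hmem
        have hm' : ∀ ch, 0 ≤ (m.insert d (m.getD d 0 - 1)).getD ch 0 := by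
          intro ch
          simp only [PySem.Dict.getD_insert]
          split_ifs with hch
          · omega
          · exact hm ch
        have := ih (m.insert d (m.getD d 0 - 1)) hm' hmem'
        simp only [markM, if_pos hv, if_pos hv', blankFirst]
        rw [if_neg (by simp)]
        refine congrArg _ (this.trans (markM_congr _ _ _ ?_))
        intro ch
        have hcd : ¬ (c = d) := fun h => hdc h.symm
        simp only [PySem.Dict.getD_insert, if_neg hdc, if_neg hcd]
        split_ifs <;> simp_all
      · have hv' : ¬ (m.insert c (m.getD c 0 + 1)).getD d 0 > 0 := by
          simpa [PySem.Dict.getD_insert, hdc] using hv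
        have hmem' : [c] ∈ markM rest m := by
          have h0 : [c] ∈ [d] :: markM rest m := by simpa [markM, hv] using hmem
          rcases List.mem_cons.mp h0 with h' | h'
          · have : c = d := by simpa using h'
            exact absurd this.symm hdc
          · exact h'
        have hne : ([d] : List Char) ≠ [c] := by simp [hdc]
        simp only [markM, if_neg hv, if_neg hv', blankFirst, if_neg hne]
        exact congrArg _ (ih m hm hmem')

theorem markM_empty (ds : List Char) : markM ds PySem.Dict.empty = ds.map (fun c => [c]) := by
  induction ds with
  | nil => rfl
  | cons c rest ih => simp [markM, PySem.Dict.getD_empty, ih]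

theorem main_invariant (ns ds : List Char) (m avail : PySem.Dict Char Int)
    (hm : ∀ ch, 0 ≤ m.getD ch 0)
    (ha : ∀ ch, avail.getD ch 0 = ((markM ds m).count [ch] : Int)) :
    (aOuter (ns.map (fun c => [c])) (markM ds m)).1.flatten = (bPass1 ns avail m).2.2
    ∧ (aOuter (ns.map (fun c => [c])) (markM ds m)).2 = markM ds (bPass1 ns avail m).2.1 := by
  induction ns generalizing m avail with
  | nil => exact ⟨rfl, rfl⟩
  | cons c rest ih =>
    by_cases hc0 : c = '0'
    · subst hc0
      have hA : aInner ['0'] (markM ds m) = (['0'], markM ds m) := aInner_zero _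
      obtain ⟨ih1, ih2⟩ := ih m avail hm ha
      constructor
      · simp [aOuter, bPass1, hA, List.map_cons, ih1]
      · simp [aOuter, bPass1, hA, List.map_cons, ih2]
    · by_cases hv : avail.getD c 0 > 0
      · -- cancel: blank first [c] on the A side, bump the dicts on the B side
        have hcnt : 0 < (markM ds m).count [c] := by
          have := ha c; omega
        have hmem : [c] ∈ markM ds m := List.count_pos_iff.mp hcnt
        have hA : aInner [c] (markM ds m) = ([], blankFirst [c] (markM ds m)) :=
          aInner_mem _ _ (by simp [hc0]) hmem
        have hblank : blankFirst [c] (markM ds m) = markM ds (m.insert c (m.getD c 0 + 1)) :=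
          markM_step ds m c hm hmem
        have hm' : ∀ ch, 0 ≤ (m.insert c (m.getD c 0 + 1)).getD ch 0 := by
          intro ch
          simp only [PySem.Dict.getD_insert]
          split_ifs with hch
          · have := hm c; omega
          · exact hm ch
        have ha' : ∀ ch, (avail.insert c (avail.getD c 0 - 1)).getD ch 0
            = ((markM ds (m.insert c (m.getD c 0 + 1))).count [ch] : Int) := by
          intro ch
          rw [← hblank, PySem.Dict.getD_insert,
            count_blankFirst [c] (markM ds m) hmem [ch] (by simp)]
          by_cases hch : ch = c
          · rw [hch]
            have h5 := ha c
            simp only [ite_true]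
            omega
          · have hne : ([ch] : List Char) ≠ [c] := by simp [hch]
            simp [hch, hne, ha ch]
        obtain ⟨ih1, ih2⟩ := ih (m.insert c (m.getD c 0 + 1)) (avail.insert c (avail.getD c 0 - 1)) hm' ha'
        have hcond : (c ≠ '0' ∧ avail.getD c 0 > 0) := ⟨hc0, hv⟩
        constructor
        · simp [aOuter, bPass1, hA, hcond, List.map_cons, hblank, ih1]
        · simp [aOuter, bPass1, hA, hcond, List.map_cons, hblank, ih2]
      · -- no availability: A finds no uncancelled match, B keeps c
        have hcnt : (markM ds m).count [c] = 0 := by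
          have := ha c; omega
        have hmem : [c] ∉ markM ds m := by
          intro hmemm
          have := List.count_pos_iff.mpr hmemm
          omega
        have hA : aInner [c] (markM ds m) = ([c], markM ds m) := aInner_not_mem _ _ hmem
        have hcond : ¬ (c ≠ '0' ∧ avail.getD c 0 > 0) := by
          intro h; exact hv h.2
        obtain ⟨ih1, ih2⟩ := ih m avail hm ha
        constructor
        · simp [aOuter, bPass1, hA, hcond, List.map_cons, ih1]
        · simp [aOuter, bPass1, hA, hcond, List.map_cons, ih2]

theorem ports_agree (numerator denominator : Int) :
    cancel_digits numerator denominator = cancel_digits_alt numerator denominator := by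
  have hm : ∀ ch, 0 ≤ (PySem.Dict.empty : PySem.Dict Char Int).getD ch 0 := by
    intro ch; simp [PySem.Dict.getD_empty]
  have ha : ∀ ch, ((PySem.Int.toChars denominator).foldl
        (fun d c => d.insert c (d.getD c 0 + 1)) PySem.Dict.empty).getD ch 0
      = ((markM (PySem.Int.toChars denominator) PySem.Dict.empty).count [ch] : Int) := by
    intro ch
    have hcm : ((PySem.Int.toChars denominator).map (fun c => [c])).count [ch]
        = (PySem.Int.toChars denominator).count ch :=
      List.count_map_of_injective (PySem.Int.toChars denominator) (fun c => [c])
        (fun a b h => by simpa using h) ch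
    rw [PySem.Dict.getD_foldl_insert_add_one, PySem.Dict.getD_empty, markM_empty, hcm]
    simp
  obtain ⟨h1, h2⟩ := main_invariant (PySem.Int.toChars numerator)
    (PySem.Int.toChars denominator) PySem.Dict.empty _ hm ha
  rw [markM_empty] at h1 h2
  simp only [cancel_digits, cancel_digits_alt]
  rw [h1, h2, flatten_markM]

-- ===== VERDICT (by name: the statement is the Claim_ definition above) =====
theorem cancel_digits_spec : Claim_equal_cancel_digits := by
  intro numerator denominator _ _
  unfold Spec_cancel_digits
  exact ports_agree numerator denominator
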